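-- pv_equiv track=rewrite | github.com/aviAVIRAL/MY_WORK | tcs_2_string/19 remove che from s1 jo chr present ho in s2 .py | f
-- ===== SOURCE A (Python) =====
-- def f(s1 , s2):
--
--     str = ''
--     mp = { }
--
--     for x in s2:
--         if x not in mp:
--             mp[x] = 1
--
--     for y in s1:
--         if y not in mp:
--             str += y
--
--     return str
-- ===== SOURCE B (Python) =====
-- def f(s1, s2):
--     # Staged deletion: for each character of s2, strike all its occurrences
--     # out of the working string; no membership structure, no filtering pass.
--     out = s1
--     for c in s2:
--         out = out.replace(c, '')
--     return out
-- ===== Notes on version B (the rewrite author's own statement) =====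
-- stated objective: alternative
-- what changed: Instead of building a membership dict from s2 and filtering s1 in one pass, B transforms s1 itself by staged deletion: one str.replace(c, '') pass per character of s2, with no membership container and no per-character test over s1.
import Mathlib
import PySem

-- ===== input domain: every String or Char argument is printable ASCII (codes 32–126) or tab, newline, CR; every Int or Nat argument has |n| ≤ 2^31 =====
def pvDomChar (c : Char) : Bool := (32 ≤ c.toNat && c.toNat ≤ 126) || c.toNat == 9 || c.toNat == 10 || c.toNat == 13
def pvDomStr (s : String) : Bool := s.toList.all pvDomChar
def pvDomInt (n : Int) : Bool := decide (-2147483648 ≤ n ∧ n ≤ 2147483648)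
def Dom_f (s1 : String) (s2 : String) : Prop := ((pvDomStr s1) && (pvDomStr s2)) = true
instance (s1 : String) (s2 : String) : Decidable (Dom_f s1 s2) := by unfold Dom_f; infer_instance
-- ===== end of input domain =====

-- B removes s2's characters by staged deletion — one replace(c, '') rewrite of the working string per character of s2 — instead of A's membership dict plus one filtering pass over s1 (alternative decomposition, same return value).


-- ===== PORT A =====
-- str accumulation and the dict are ported over List Char / PySem.Dict, exact on the domain.
def f (s1 : String) (s2 : String) : String :=
  let mp : PySem.Dict Char Int :=
    s2.toList.foldl (fun mp x => if mp.contains x then mp else mp.insert x 1) PySem.Dict.empty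
  String.ofList (s1.toList.foldl (fun acc y => if mp.contains y then acc else acc ++ [y]) [])

-- ===== PORT B =====
-- out = s1; for c in s2: out = out.replace(c, '')  — each step is PySem.Str.replace with the
-- one-character string and the empty replacement, exactly as Source B calls str.replace.
def f_alt (s1 : String) (s2 : String) : String :=
  s2.toList.foldl (fun out c => PySem.Str.replace out (String.ofList [c]) "") s1

-- ===== PRECONDITION & SPEC =====
def Spec_f (s1 : String) (s2 : String) (out : String) : Prop := out = f_alt s1 s2
instance (s1 : String) (s2 : String) (out : String) : Decidable (Spec_f s1 s2 out) := by unfold Spec_f; infer_instance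

-- ===== CLAIM (what is proved, stated in full; the proofs are below) =====
def Claim_equal_f : Prop := ∀ (s1 : String) (s2 : String), Dom_f s1 s2 → Spec_f s1 s2 (f s1 s2)

-- ===== LEMMAS AND PROOFS =====

-- the dict built by A's first loop contains exactly the characters of s2
theorem pv_mp_contains (l : List Char) (d : PySem.Dict Char Int) (y : Char) :
    (l.foldl (fun mp x => if mp.contains x then mp else mp.insert x 1) d).contains y
      = (d.contains y || l.contains y) := by
  induction l generalizing d with
  | nil => simp
  | cons x xs ih =>
    simp only [List.foldl_cons, List.contains_cons]
    by_cases hx : d.contains x = true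
    · rw [if_pos hx, ih]
      by_cases hxy : y = x
      · subst hxy; simp [hx]
      · have hb : (y == x) = false := by simp [hxy]
        simp [hb]
    · rw [if_neg hx, ih, PySem.Dict.contains_insert]
      by_cases hxy : y = x
      · subst hxy; simp
      · have hb : (y == x) = false := by simp [hxy]
        simp [hb]

-- A's second loop is a filter
theorem pv_loop_filter (l : List Char) (p : Char → Bool) (acc : List Char) :
    l.foldl (fun acc y => if p y then acc else acc ++ [y]) acc
      = acc ++ l.filter (fun y => !(p y)) := by
  induction l generalizing acc with
  | nil => simp
  | cons x xs ih =>
    by_cases hx : p x = true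
    · simp [hx, ih]
    · simp [hx, ih]

-- replacing one character by the empty string deletes its occurrences (go-level invariant)
theorem pv_replace_go (c : Char) (l acc : List Char) (fuel : Nat) (h : l.length ≤ fuel) :
    PySem.Chars.replace.go [c] [] fuel l acc
      = acc.reverse ++ l.filter (fun x => !(x == c)) := by
  induction fuel generalizing l acc with
  | zero =>
    have : l = [] := List.length_eq_zero_iff.mp (Nat.le_zero.mp h)
    subst this; simp [PySem.Chars.replace.go]
  | succ n ih =>
    cases l with
    | nil => simp [PySem.Chars.replace.go]
    | cons x t =>
      simp only [PySem.Chars.replace.go]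
      by_cases hx : x = c
      · subst hx
        have hpre : [x].isPrefixOf (x :: t) = true := by simp [List.isPrefixOf]
        rw [if_pos hpre]
        simp only [List.length_cons, List.length_nil, List.drop_succ_cons, List.drop_zero,
          List.reverse_nil, List.nil_append]
        rw [ih t acc (by simpa using Nat.lt_succ_iff.mp (by simpa using h))]
        simp
      · have hpre : [c].isPrefixOf (x :: t) = false := by
          simp [List.isPrefixOf]
          exact fun hcx => (hx hcx.symm).elim
        rw [if_neg (by simp [hpre])]
        rw [ih t (x :: acc) (by simpa using Nat.lt_succ_iff.mp (by simpa using h))]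
        have hb : (x == c) = false := by simp [hx]
        simp [hb]

theorem pv_replace_del (s : List Char) (c : Char) :
    PySem.Chars.replace s [c] [] = s.filter (fun x => !(x == c)) := by
  unfold PySem.Chars.replace
  rw [if_neg (by simp)]
  simpa using pv_replace_go c s [] s.length le_rfl

-- B's staged deletions amount to filtering out all of l's characters
theorem pv_staged_filter (l : List Char) (s : String) :
    l.foldl (fun out c => PySem.Str.replace out (String.ofList [c]) "") s
      = String.ofList (s.toList.filter (fun x => !(l.contains x))) := by
  induction l generalizing s with
  | nil =>
    simp [String.ofList]
  | cons c t ih =>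
    simp only [List.foldl_cons]
    rw [ih]
    have hrep : PySem.Str.replace s (String.ofList [c]) ""
        = String.ofList (s.toList.filter (fun x => !(x == c))) := by
      simp [PySem.Str.replace, pv_replace_del]
    rw [hrep]
    congr 1
    rw [String.toList_ofList, List.filter_filter]
    apply List.filter_congr
    intro x _
    simp only [List.contains_cons]
    by_cases hxc : x = c <;> simp [hxc, Bool.and_comm]

-- ===== VERDICT (by name: the statement is the Claim_ definition above) =====
theorem f_spec : Claim_equal_f := by
  intro s1 s2 _
  unfold Spec_f f f_alt
  rw [pv_staged_filter]
  simp only [pv_loop_filter, List.nil_append]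
  congr 1
  apply List.filter_congr
  intro y _
  rw [pv_mp_contains]
  simp [PySem.Dict.contains_eq_isSome_get?, PySem.Dict.get?_empty]
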